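-- pv_equiv track=rewrite | github.com/JordanJTW/cyder | gen/typegen/compiler/error_message.py | calculate_line_spans
-- ===== SOURCE A (Python) =====
-- def calculate_line_spans(contents: str):
--   """Generates a list of tuples representing the start and end
--      of each line within `contents`"""
--   start_of_line = 0
--   line_spans = []
--   for index, char in enumerate(contents):
--     if char == '\n':
--       line_spans.append((start_of_line, index))
--       start_of_line = index + 1
--
--   line_spans.append((start_of_line, len(contents)))
--   return line_spans
-- ===== SOURCE B (Python) =====
-- def calculate_line_spans(contents: str):
--   """Generates a list of tuples representing the start and end
--      of each line within `contents`"""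
--   newlines = [i for i, c in enumerate(contents) if c == '\n']
--   starts = [0] + [i + 1 for i in newlines]
--   ends = newlines + [len(contents)]
--   return list(zip(starts, ends))
-- ===== Notes on version B (the rewrite author's own statement) =====
-- stated objective: alternative
-- what changed: Replaces A's single accumulator loop (tracking the running line start and appending spans on each newline) by staged passes: collect all newline indices first, derive the start and end lists arithmetically, and zip them together.
import Mathlib
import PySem

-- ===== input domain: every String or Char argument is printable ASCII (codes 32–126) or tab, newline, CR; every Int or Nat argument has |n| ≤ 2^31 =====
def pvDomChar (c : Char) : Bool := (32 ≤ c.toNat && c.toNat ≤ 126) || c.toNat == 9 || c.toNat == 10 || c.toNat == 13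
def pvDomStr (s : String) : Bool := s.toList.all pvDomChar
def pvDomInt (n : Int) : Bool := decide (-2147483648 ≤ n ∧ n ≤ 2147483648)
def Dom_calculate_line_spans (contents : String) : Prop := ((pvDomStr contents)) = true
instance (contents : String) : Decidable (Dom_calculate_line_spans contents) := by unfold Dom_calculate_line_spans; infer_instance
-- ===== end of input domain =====

-- B replaces A's accumulator loop by staged passes: collect newline indices, derive start/end lists, zip (alternative decomposition, same O(n) cost).

-- ===== PORT A =====
def calculate_line_spans (contents : String) : List (Int × Int) :=
  let r := (PySem.List.enumerate contents.toList).foldl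
    (fun (st : Int × List (Int × Int)) ic =>
      if ic.2 = '\n' then (ic.1 + 1, st.2 ++ [(st.1, ic.1)]) else st)
    (0, [])
  r.2 ++ [(r.1, PySem.Str.len contents)]

-- ===== PORT B =====
def calculate_line_spans_alt (contents : String) : List (Int × Int) :=
  let newlines := (PySem.List.enumerate contents.toList).filterMap
    (fun ic => if ic.2 = '\n' then some ic.1 else none)
  let starts := 0 :: newlines.map (· + 1)
  let ends := newlines ++ [PySem.Str.len contents]
  starts.zip ends

-- ===== PRECONDITION & SPEC =====
def Spec_calculate_line_spans (contents : String) (out : List (Int × Int)) : Prop := out = calculate_line_spans_alt contents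
instance (contents : String) (out : List (Int × Int)) : Decidable (Spec_calculate_line_spans contents out) := by unfold Spec_calculate_line_spans; infer_instance

-- ===== CLAIM =====
def Claim_equal_calculate_line_spans : Prop := ∀ (contents : String), Dom_calculate_line_spans contents → Spec_calculate_line_spans contents (calculate_line_spans contents)

-- ===== LEMMAS AND PROOFS =====

-- proof-only: the common value of both programs, `s` = start of the current line, `i` = current index
def pvSpans (s i : Int) : List Char → List (Int × Int)
  | [] => [(s, i)]
  | c :: rest => if c = '\n' then (s, i) :: pvSpans (i + 1) (i + 1) rest else pvSpans s (i + 1) rest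

theorem pvA_fold (cs : List Char) : ∀ (i s : Int) (acc : List (Int × Int)),
    (let r := (PySem.List.enumerate cs i).foldl
      (fun (st : Int × List (Int × Int)) ic =>
        if ic.2 = '\n' then (ic.1 + 1, st.2 ++ [(st.1, ic.1)]) else st)
      (s, acc)
     r.2 ++ [(r.1, i + cs.length)]) = acc ++ pvSpans s i cs := by
  induction cs with
  | nil => intro i s acc; simp [PySem.List.enumerate, pvSpans]
  | cons c rest ih =>
    intro i s acc
    rw [PySem.List.enumerate_cons, List.foldl_cons]
    by_cases hc : c = '\n'
    · rw [if_pos (show ((i, c) : Int × Char).2 = '\n' from hc)]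
      have := ih (i + 1) (i + 1) (acc ++ [(s, i)])
      simp only at this ⊢
      rw [show (i : Int) + (((c :: rest).length : Nat) : Int) = i + 1 + rest.length by push_cast [List.length_cons]; ring]
      rw [this]
      subst hc
      simp [pvSpans]
    · rw [if_neg (show ¬ ((i, c) : Int × Char).2 = '\n' from hc)]
      have := ih (i + 1) s acc
      simp only at this ⊢
      rw [show (i : Int) + (((c :: rest).length : Nat) : Int) = i + 1 + rest.length by push_cast [List.length_cons]; ring]
      rw [this]
      simp [pvSpans, hc]

theorem pvB_zip (cs : List Char) : ∀ (i s : Int),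
    (let nls := (PySem.List.enumerate cs i).filterMap
        (fun ic => if ic.2 = '\n' then some ic.1 else none)
     (s :: nls.map (· + 1)).zip (nls ++ [i + cs.length])) = pvSpans s i cs := by
  induction cs with
  | nil => intro i s; simp [PySem.List.enumerate, pvSpans]
  | cons c rest ih =>
    intro i s
    rw [PySem.List.enumerate_cons]
    by_cases hc : c = '\n'
    · simp only [List.filterMap_cons, if_pos (show ((i, c) : Int × Char).2 = '\n' from hc)]
      have := ih (i + 1) (i + 1)
      simp only at this ⊢
      rw [show (i : Int) + (((c :: rest).length : Nat) : Int) = i + 1 + rest.length by push_cast [List.length_cons]; ring]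
      simp only [List.map_cons, List.cons_append, List.zip_cons_cons]
      rw [this]
      subst hc
      simp [pvSpans]
    · simp only [List.filterMap_cons, if_neg (show ¬ ((i, c) : Int × Char).2 = '\n' from hc)]
      have := ih (i + 1) s
      simp only at this ⊢
      rw [show (i : Int) + (((c :: rest).length : Nat) : Int) = i + 1 + rest.length by push_cast [List.length_cons]; ring]
      rw [this]
      simp [pvSpans, hc]

-- ===== VERDICT =====
theorem calculate_line_spans_spec : Claim_equal_calculate_line_spans := by
  intro contents _
  show calculate_line_spans contents = calculate_line_spans_alt contents
  unfold calculate_line_spans calculate_line_spans_alt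
  have hA := pvA_fold contents.toList 0 0 []
  have hB := pvB_zip contents.toList 0 0
  simp only [List.nil_append, zero_add] at hA hB
  simp only [PySem.Str.len_eq]
  rw [hB]
  simpa using hA
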